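-- pv_equiv track=rewrite | github.com/ksylvan/euler | p036.py | decimalPalindromesLessThan
-- ===== SOURCE A (Python) =====
-- def decimalPalindromesLessThan(n: int) -> int:
--     """
--     Generator of decimal palindromes less than the given number.
--     """
--     def single(): # single digit palindrome
--         for v in range(1, 10):
--             yield v
--     def double(leadingZero = False): # double digit palindrome
--         if leadingZero:
--             yield 0
--         for v in [k*11 for k in range(1, 10)]:
--             yield v
--     def triple(leadingZero = False): # triple digit palindrome
--         start_with = 0 if leadingZero else 1
--         for i in range(start_with, 10):
--             for j in range(10):
--                 yield 100*i + 10*j + i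
--     def quadruple(leadingZero = False): # quadruple digit palindrome
--         start_with = 0 if leadingZero else 1
--         for i in range(start_with, 10):
--             for j in range(10):
--                 yield 1000*i + 100*j + 10*j + i
--
--     # single digit
--     for i in single():
--         if i < n:
--             yield i
--     # double digits
--     for i in double():
--         if i < n:
--             yield i
--     # triple digits
--     for i in triple():
--         if i < n:
--             yield i
--     # quadruple digits
--     for i in quadruple():
--         if i < n:
--             yield i
--     # 5 digits
--     for i in range(1, 10):
--         for j in triple(leadingZero=True):
--             v = i*10000+ 10*j + i
--             if v < n:
--                 yield v
--     # 6 digits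
--     for i in range(1, 10):
--         for j in quadruple(leadingZero=True):
--             v = i*100000+ 10*j + i
--             if v < n:
--                 yield v
-- ===== SOURCE B (Python) =====
-- def decimalPalindromesLessThan(n: int):
--     """Yield decimal palindromes less than n, lengths 1..6, by mirroring a half-prefix."""
--     for L in range(1, 7):
--         h = (L + 1) // 2
--         for p in range(10 ** (h - 1), 10 ** h):
--             q = p // 10 if L % 2 else p
--             v = p
--             while q:
--                 v = v * 10 + q % 10
--                 q //= 10
--             if v < n:
--                 yield v
-- ===== Notes on version B (the rewrite author's own statement) =====
-- stated objective: simpler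
-- what changed: Replaces A's six hand-coded per-length arithmetic generators (single/double/triple/quadruple plus two nesting loops) by one uniform loop over digit-lengths 1..6 that mirrors a numeric half-prefix (v = v*10 + q%10 while halving q) to build each palindrome.
import Mathlib
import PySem

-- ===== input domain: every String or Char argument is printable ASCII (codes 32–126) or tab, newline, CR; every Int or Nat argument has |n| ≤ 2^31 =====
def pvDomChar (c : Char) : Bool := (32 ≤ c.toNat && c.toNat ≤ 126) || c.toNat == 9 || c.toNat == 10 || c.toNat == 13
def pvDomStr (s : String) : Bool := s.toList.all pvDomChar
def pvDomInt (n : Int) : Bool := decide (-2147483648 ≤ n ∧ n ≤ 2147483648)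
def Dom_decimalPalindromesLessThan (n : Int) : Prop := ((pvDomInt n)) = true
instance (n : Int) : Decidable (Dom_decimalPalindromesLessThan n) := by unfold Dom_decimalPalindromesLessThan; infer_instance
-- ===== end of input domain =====

-- B replaces A's six hand-coded digit-arithmetic generators by one length-indexed loop that
-- mirrors a half-prefix numerically (objective: simpler, same cost).

-- ===== PORT A =====
-- the inner generators of A, as list builders (yield sequence = list, in yield order)
def pySingle : List Int := PySem.List.pyRange 1 10 1

def pyDouble (leadingZero : Bool) : List Int :=
  (if leadingZero then [(0 : Int)] else []) ++ (PySem.List.pyRange 1 10 1).map (fun k => k * 11)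

def pyTriple (leadingZero : Bool) : List Int :=
  (PySem.List.pyRange (if leadingZero then 0 else 1) 10 1).flatMap (fun i =>
    (PySem.List.pyRange 0 10 1).map (fun j => 100 * i + 10 * j + i))

def pyQuadruple (leadingZero : Bool) : List Int :=
  (PySem.List.pyRange (if leadingZero then 0 else 1) 10 1).flatMap (fun i =>
    (PySem.List.pyRange 0 10 1).map (fun j => 1000 * i + 100 * j + 10 * j + i))

def decimalPalindromesLessThan (n : Int) : List Int :=
  (pySingle.filter (fun i => i < n)) ++
  ((pyDouble false).filter (fun i => i < n)) ++
  ((pyTriple false).filter (fun i => i < n)) ++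
  ((pyQuadruple false).filter (fun i => i < n)) ++
  ((PySem.List.pyRange 1 10 1).flatMap (fun i =>
    ((pyTriple true).map (fun j => i * 10000 + 10 * j + i)).filter (fun v => v < n))) ++
  ((PySem.List.pyRange 1 10 1).flatMap (fun i =>
    ((pyQuadruple true).map (fun j => i * 100000 + 10 * j + i)).filter (fun v => v < n)))

-- ===== PORT B =====
-- Source B's `while q: v = v*10 + q%10; q //= 10`; exact for q ≥ 0 (the only values Source B reaches:
-- the guard q ≤ 0 coincides with Python's q == 0 there).
def mirrorGo : Nat → Int → Int → Int
  | 0, v, _ => v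
  | fuel + 1, v, q =>
      if q ≤ 0 then v
      else mirrorGo fuel (v * 10 + PySem.Int.mod q 10) (PySem.Int.floordiv q 10)

-- fuel q.toNat bounds the iteration count: q strictly decreases under q //= 10 while q > 0
def mirrorLoop (v q : Int) : Int := mirrorGo q.toNat v q

-- 10 ** (h - 1) and 10 ** h: here 1 ≤ h ≤ 3, so .toNat on the exponent is exact
def decimalPalindromesLessThan_alt (n : Int) : List Int :=
  (PySem.List.pyRange 1 7 1).flatMap (fun L =>
    let h := PySem.Int.floordiv (L + 1) 2
    (PySem.List.pyRange (10 ^ (h - 1).toNat) (10 ^ h.toNat) 1).flatMap (fun p =>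
      let q := if PySem.Int.mod L 2 ≠ 0 then PySem.Int.floordiv p 10 else p
      let v := mirrorLoop p q
      if v < n then [v] else []))

-- ===== PRECONDITION & SPEC =====
def Spec_decimalPalindromesLessThan (n : Int) (out : List Int) : Prop := out = decimalPalindromesLessThan_alt n
instance (n : Int) (out : List Int) : Decidable (Spec_decimalPalindromesLessThan n out) := by unfold Spec_decimalPalindromesLessThan; infer_instance

-- ===== CLAIM (what is proved, stated in full; the proofs are below) =====
def Claim_equal_decimalPalindromesLessThan : Prop := ∀ (n : Int), Dom_decimalPalindromesLessThan n → Spec_decimalPalindromesLessThan n (decimalPalindromesLessThan n)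

-- ===== LEMMAS AND PROOFS =====

-- the palindromes A enumerates, before the `< n` filter
def bigA : List Int :=
  pySingle ++ pyDouble false ++ pyTriple false ++ pyQuadruple false ++
  ((PySem.List.pyRange 1 10 1).flatMap (fun i => (pyTriple true).map (fun j => i * 10000 + 10 * j + i))) ++
  ((PySem.List.pyRange 1 10 1).flatMap (fun i => (pyQuadruple true).map (fun j => i * 100000 + 10 * j + i)))

-- the palindromes B enumerates, before the `< n` filter
def bigB : List Int :=
  (PySem.List.pyRange 1 7 1).flatMap (fun L =>
    let h := PySem.Int.floordiv (L + 1) 2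
    (PySem.List.pyRange (10 ^ (h - 1).toNat) (10 ^ h.toNat) 1).map (fun p =>
      mirrorLoop p (if PySem.Int.mod L 2 ≠ 0 then PySem.Int.floordiv p 10 else p)))

lemma flatMap_ite_eq_filter_map (l : List Int) (f : Int → Int) (n : Int) :
    l.flatMap (fun a => if f a < n then [f a] else []) = (l.map f).filter (fun v => v < n) := by
  induction l with
  | nil => rfl
  | cons a t ih =>
      simp only [List.flatMap_cons, List.map_cons, List.filter_cons, ih]
      by_cases h : f a < n <;> simp [h]

lemma A_eq_filter (n : Int) : decimalPalindromesLessThan n = bigA.filter (fun v => v < n) := by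
  simp [decimalPalindromesLessThan, bigA, List.filter_append, List.filter_flatMap]

lemma B_eq_filter (n : Int) : decimalPalindromesLessThan_alt n = bigB.filter (fun v => v < n) := by
  simp only [decimalPalindromesLessThan_alt, bigB, flatMap_ite_eq_filter_map,
    List.filter_flatMap]

set_option maxRecDepth 100000 in
lemma bigA_eq_bigB : bigA = bigB := by decide

-- ===== VERDICT (by name: the statement is the Claim_ definition above) =====
theorem decimalPalindromesLessThan_spec : Claim_equal_decimalPalindromesLessThan := by
  intro n _
  unfold Spec_decimalPalindromesLessThan
  rw [A_eq_filter, B_eq_filter, bigA_eq_bigB]
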